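-- pv_equiv track=rewrite | github.com/bita-alexandru/College-Homework | CALCUL-NUMERIC/tema5/t5.py | get_init
-- ===== SOURCE A (Python) =====
-- def get_init(n, A):
--     init = [[0 for _ in range(n)] for _ in range(n)]
--
--     cnt = 0
--     for i in range(n):
--         for j in range(i+1):
--             init[i][j] = init[j][i] = A[cnt]
--             cnt += 1
--
--     return init
-- ===== SOURCE B (Python) =====
-- def get_init(n, A):
--     # closed-form packed-triangular indexing: entry (i,j) is A[r*(r+1)//2 + c]
--     # with r = max(i,j), c = min(i,j); no counter, no mutation.
--     def at_(i, j):
--         r, c = (i, j) if i >= j else (j, i)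
--         return A[r * (r + 1) // 2 + c]
--     return [[at_(i, j) for j in range(n)] for i in range(n)]
-- ===== Notes on version B (the rewrite author's own statement) =====
-- stated objective: simpler
-- what changed: B replaces the counter-driven fill with chained double assignment by a closed-form packed-triangular index formula (entry (i,j) = A[max(i,j)*(max(i,j)+1)//2 + min(i,j)]) used in a pure nested comprehension, with no zero matrix, no counter and no mutation.
import Mathlib
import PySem

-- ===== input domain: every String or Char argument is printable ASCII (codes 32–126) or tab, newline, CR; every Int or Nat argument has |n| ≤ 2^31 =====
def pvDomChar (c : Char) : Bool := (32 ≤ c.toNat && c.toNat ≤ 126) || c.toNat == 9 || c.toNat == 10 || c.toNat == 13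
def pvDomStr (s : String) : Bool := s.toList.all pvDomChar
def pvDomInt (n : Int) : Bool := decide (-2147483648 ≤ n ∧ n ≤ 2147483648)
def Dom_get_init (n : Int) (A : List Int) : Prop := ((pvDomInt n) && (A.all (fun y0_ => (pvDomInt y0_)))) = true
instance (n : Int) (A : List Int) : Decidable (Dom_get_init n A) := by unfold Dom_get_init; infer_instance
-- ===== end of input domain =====

-- B replaces A's counter-driven fill with double assignment by a closed-form
-- packed-triangular index formula in a pure nested comprehension (simpler).


-- ===== PORT A =====
-- A: zero matrix, then for i in range(n): for j in range(i+1):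
--    init[i][j] = init[j][i] = A[cnt]; cnt += 1.
-- A[cnt] is ported as (pyGet? A cnt).getD 0; Pre_ excludes the inputs where
-- pyGet? is none (Python raises IndexError there).
def get_init (n : Int) (A : List Int) : List (List Int) :=
  let N := n.toNat
  let init := List.replicate N (List.replicate N (0 : Int))
  ((List.range N).foldl
    (fun (st : List (List Int) × Nat) i =>
      (List.range (i + 1)).foldl
        (fun (st : List (List Int) × Nat) j =>
          let v := (PySem.List.pyGet? A (Int.ofNat st.2)).getD 0
          let m := st.1
          let m := m.set i ((m.getD i []).set j v)
          let m := m.set j ((m.getD j []).set i v)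
          (m, st.2 + 1))
        st)
    (init, 0)).1

-- ===== PORT B =====
-- B: entry (i,j) = A[r*(r+1)//2 + c] with r = max i j, c = min i j,
-- built as a nested comprehension.
def get_init_alt (n : Int) (A : List Int) : List (List Int) :=
  let N := n.toNat
  (List.range N).map (fun i =>
    (List.range N).map (fun j =>
      let r := max i j
      let c := min i j
      (PySem.List.pyGet? A (Int.ofNat (r * (r + 1) / 2 + c))).getD 0))

-- ===== PRECONDITION & SPEC =====
-- Pre_ excludes exactly the inputs where Python's A raises IndexError:
-- n ≥ 1 with fewer than n*(n+1)/2 elements in A (B raises there too).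
def Pre_get_init (n : Int) (A : List Int) : Prop :=
  n ≤ 0 ∨ n * (n + 1) / 2 ≤ (A.length : Int)
instance (n : Int) (A : List Int) : Decidable (Pre_get_init n A) := by
  unfold Pre_get_init; infer_instance

def pvWitness_get_init : Int × List Int := (3, [1, 2, 3, 4, 5, 6])

def Spec_get_init (n : Int) (A : List Int) (out : List (List Int)) : Prop := out = get_init_alt n A
instance (n : Int) (A : List Int) (out : List (List Int)) : Decidable (Spec_get_init n A out) := by unfold Spec_get_init; infer_instance

-- ===== CLAIM (what is proved, stated in full; the proofs are below) =====
def Claim_equal_get_init : Prop := ∀ (n : Int) (A : List Int), Dom_get_init n A → Pre_get_init n A → Spec_get_init n A (get_init n A)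

-- ===== LEMMAS AND PROOFS =====

-- triangular numbers
def pvTri : Nat → Nat
  | 0 => 0
  | k + 1 => pvTri k + (k + 1)

theorem pvTri_double (k : Nat) : 2 * pvTri k = k * (k + 1) := by
  induction k with
  | zero => rfl
  | succ k ih => rw [pvTri, Nat.mul_add, ih]; ring

theorem pvTri_closed (k : Nat) : pvTri k = k * (k + 1) / 2 := by
  have := pvTri_double k
  omega

-- the target entry value
def pvG (A : List Int) (r c : Nat) : Int :=
  (PySem.List.pyGet? A (Int.ofNat (pvTri (max r c) + min r c))).getD 0

theorem pvG_symm (A : List Int) (r c : Nat) : pvG A r c = pvG A c r := by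
  simp [pvG, Nat.max_comm, Nat.min_comm]

-- matrix over range N defined by a function
def pvM (N : Nat) (f : Nat → Nat → Int) : List (List Int) :=
  (List.range N).map (fun r => (List.range N).map (f r))

theorem set_map_range {α : Type} (N j : Nat) (h : Nat → α) (v : α) :
    ((List.range N).map h).set j v
      = (List.range N).map (fun c => if c = j then v else h c) := by
  apply List.ext_getElem
  · simp
  · intro i h1 h2
    simp only [List.getElem_set, List.getElem_map, List.getElem_range]
    rcases eq_or_ne i j with h | h
    · subst h; simp
    · rw [if_neg (Ne.symm h), if_neg h]

theorem getD_map_range' {α : Type} (N i : Nat) (h : Nat → α) (d : α) (hi : i < N) :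
    ((List.range N).map h).getD i d = h i := by
  rw [List.getD_eq_getElem?_getD]
  simp [hi]

theorem map_range_congr {α : Type} (N : Nat) (f g : Nat → α)
    (h : ∀ i, i < N → f i = g i) :
    (List.range N).map f = (List.range N).map g := by
  apply List.map_congr_left
  intro i hi
  exact h i (List.mem_range.mp hi)

theorem pvM_congr (N : Nat) (f g : Nat → Nat → Int)
    (h : ∀ r c, r < N → c < N → f r c = g r c) : pvM N f = pvM N g := by
  unfold pvM
  apply map_range_congr
  intro r hr
  apply map_range_congr
  intro c hc
  exact h r c hr hc

-- one Python assignment  m[i][j] = v  applied to a pvM matrix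
theorem pvM_set_entry (N i j : Nat) (f : Nat → Nat → Int) (v : Int) (hi : i < N) :
    (pvM N f).set i (((pvM N f).getD i []).set j v)
      = pvM N (fun r c => if r = i ∧ c = j then v else f r c) := by
  unfold pvM
  rw [getD_map_range' N i (fun r => (List.range N).map (f r)) [] hi]
  rw [set_map_range N j (f i) v]
  rw [set_map_range N i (fun r => (List.range N).map (f r))
        ((List.range N).map (fun c => if c = j then v else f i c))]
  apply map_range_congr
  intro r hr
  by_cases h : r = i
  · subst h
    rw [if_pos rfl]
    apply map_range_congr
    intro c hc
    by_cases hcj : c = j <;> simp [hcj]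
  · simp only [if_neg h]
    apply map_range_congr
    intro c hc
    simp [h]

-- the inner loop body of port A
def pvStep (A : List Int) (i : Nat) (st : List (List Int) × Nat) (j : Nat) :
    List (List Int) × Nat :=
  let v := (PySem.List.pyGet? A (Int.ofNat st.2)).getD 0
  let m := st.1
  let m := m.set i ((m.getD i []).set j v)
  let m := m.set j ((m.getD j []).set i v)
  (m, st.2 + 1)

theorem inner_invariant (A : List Int) (N i : Nat) (hi : i < N) :
    ∀ t, t ≤ i + 1 →
    (List.range t).foldl (pvStep A i)
        (pvM N (fun r c => if max r c < i then pvG A r c else 0), pvTri i)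
      = (pvM N (fun r c =>
            if max r c < i ∨ (max r c = i ∧ min r c < t) then pvG A r c else 0),
         pvTri i + t) := by
  intro t ht
  induction t with
  | zero =>
    simp only [List.range_zero, List.foldl_nil, Nat.add_zero]
    rw [Prod.mk.injEq]
    refine ⟨?_, rfl⟩
    apply pvM_congr
    intro r c _ _
    have : ¬ (max r c = i ∧ min r c < 0) := by omega
    simp only [this, or_false]
  | succ t ih =>
    have ht' : t ≤ i + 1 := by omega
    have hji : t ≤ i := by omega
    have htN : t < N := by omega
    rw [List.range_succ, List.foldl_append, ih ht', List.foldl_cons, List.foldl_nil]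
    show pvStep A i _ t = _
    unfold pvStep
    simp only
    rw [pvM_set_entry N i t _ _ hi]
    rw [pvM_set_entry N t i _ _ htN]
    have hv : (PySem.List.pyGet? A (Int.ofNat (pvTri i + t))).getD 0 = pvG A i t := by
      unfold pvG
      have h1 : max i t = i := by omega
      have h2 : min i t = t := by omega
      rw [h1, h2]
    rw [hv]
    rw [Prod.mk.injEq]
    refine ⟨?_, rfl⟩
    apply pvM_congr
    intro r c hr hc
    by_cases h1 : r = t ∧ c = i
    · obtain ⟨h1a, h1b⟩ := h1
      rw [if_pos ⟨h1a, h1b⟩]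
      rw [if_pos (show max r c < i ∨ (max r c = i ∧ min r c < t + 1) by omega)]
      rw [h1a, h1b]
      exact pvG_symm A i t
    · rw [if_neg h1]
      by_cases h2 : r = i ∧ c = t
      · obtain ⟨h2a, h2b⟩ := h2
        rw [if_pos ⟨h2a, h2b⟩]
        rw [if_pos (show max r c < i ∨ (max r c = i ∧ min r c < t + 1) by omega)]
        rw [h2a, h2b]
      · rw [if_neg h2]
        split_ifs with h3 h4
        · rfl
        · exfalso; omega
        · exfalso; omega
        · rfl

theorem outer_invariant (A : List Int) (N : Nat) :
    ∀ k, k ≤ N →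
    (List.range k).foldl
        (fun (st : List (List Int) × Nat) i =>
          (List.range (i + 1)).foldl (pvStep A i) st)
        (pvM N (fun _ _ => 0), 0)
      = (pvM N (fun r c => if max r c < k then pvG A r c else 0), pvTri k) := by
  intro k hk
  induction k with
  | zero =>
    simp only [List.range_zero, List.foldl_nil]
    rw [Prod.mk.injEq]
    refine ⟨?_, rfl⟩
    apply pvM_congr
    intro r c _ _
    simp
  | succ k ih =>
    have hk' : k ≤ N := by omega
    have hkN : k < N := by omega
    rw [List.range_succ, List.foldl_append, ih hk', List.foldl_cons, List.foldl_nil]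
    show (List.range (k + 1)).foldl (pvStep A k) _ = _
    rw [inner_invariant A N k hkN (k + 1) (by omega)]
    rw [Prod.mk.injEq]
    constructor
    · apply pvM_congr
      intro r c hr hc
      split_ifs with h3 h4
      · rfl
      · exfalso; omega
      · exfalso; omega
      · rfl
    · simp [pvTri]

theorem replicate_eq_pvM_zero (N : Nat) :
    List.replicate N (List.replicate N (0 : Int)) = pvM N (fun _ _ => 0) := by
  unfold pvM
  apply List.ext_getElem
  · simp
  · intro i h1 h2
    simp

theorem get_init_eq_alt (n : Int) (A : List Int) : get_init n A = get_init_alt n A := by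
  unfold get_init get_init_alt
  simp only
  rw [replicate_eq_pvM_zero]
  have hfold :
      (List.range n.toNat).foldl
        (fun (st : List (List Int) × Nat) i =>
          (List.range (i + 1)).foldl
            (fun (st : List (List Int) × Nat) j =>
              let v := (PySem.List.pyGet? A (Int.ofNat st.2)).getD 0
              let m := st.1
              let m := m.set i ((m.getD i []).set j v)
              let m := m.set j ((m.getD j []).set i v)
              (m, st.2 + 1))
            st)
        (pvM n.toNat (fun _ _ => 0), 0)
      = (List.range n.toNat).foldl
        (fun (st : List (List Int) × Nat) i =>
          (List.range (i + 1)).foldl (pvStep A i) st)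
        (pvM n.toNat (fun _ _ => 0), 0) := rfl
  rw [hfold, outer_invariant A n.toNat n.toNat (le_refl _)]
  unfold pvM
  apply map_range_congr
  intro r hr
  apply map_range_congr
  intro c hc
  show (if max r c < n.toNat then pvG A r c else 0)
      = (PySem.List.pyGet? A (Int.ofNat (max r c * (max r c + 1) / 2 + min r c))).getD 0
  rw [if_pos (by omega : max r c < n.toNat)]
  unfold pvG
  rw [pvTri_closed]

-- ===== VERDICT (by name: the statement is the Claim_ definition above) =====
theorem get_init_spec : Claim_equal_get_init := by
  intro n A _ _
  unfold Spec_get_init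
  exact get_init_eq_alt n A
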